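-- pv_equiv track=rewrite | github.com/LEE-DA-EUN/Auto_CT | 프로그래머스/1/42862. 체육복/체육복.py | solution
-- ===== SOURCE A (Python) =====
-- def solution(n, lost, reserve):
--     losts = set(lost)-set(reserve)
--     reserves = set(reserve)-set(lost)
--
--     for i in sorted(reserves):
--         if i-1 in losts:
--             losts.remove(i-1)
--         elif i+1 in losts:
--             losts.remove(i+1)
--
--     answer = n-len(losts)
--     return answer
-- ===== SOURCE B (Python) =====
-- def solution(n, lost, reserve):
--     losts = sorted(set(lost) - set(reserve))
--     reserves = sorted(set(reserve) - set(lost))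
--     i = j = matched = 0
--     while i < len(losts) and j < len(reserves):
--         if losts[i] < reserves[j] - 1:
--             i += 1
--         elif losts[i] > reserves[j] + 1:
--             j += 1
--         else:
--             matched += 1
--             i += 1
--             j += 1
--     return n - (len(losts) - matched)
-- ===== Notes on version B (the rewrite author's own statement) =====
-- stated objective: alternative
-- what changed: A loops over the sorted reserve set while repeatedly testing membership in and removing from a mutable lost set; B instead sorts both difference sets once and counts matches with a single two-pointer merge over the two sorted lists, with no set mutation.
import Mathlib
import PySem

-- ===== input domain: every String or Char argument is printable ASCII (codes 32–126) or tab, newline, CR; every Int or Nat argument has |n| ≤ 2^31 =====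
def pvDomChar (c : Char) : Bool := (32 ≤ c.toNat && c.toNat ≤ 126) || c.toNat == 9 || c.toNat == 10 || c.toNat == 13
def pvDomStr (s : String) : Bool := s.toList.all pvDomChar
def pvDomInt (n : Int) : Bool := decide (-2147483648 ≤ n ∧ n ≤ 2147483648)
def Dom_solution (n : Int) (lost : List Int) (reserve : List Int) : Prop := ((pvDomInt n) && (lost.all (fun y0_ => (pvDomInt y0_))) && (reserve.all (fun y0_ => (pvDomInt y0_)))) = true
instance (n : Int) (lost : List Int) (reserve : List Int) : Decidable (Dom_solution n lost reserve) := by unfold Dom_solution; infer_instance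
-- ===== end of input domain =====

-- B replaces A's loop over sorted reserves with mutable-set membership/removal by a
-- two-pointer merge of the two sorted difference lists (alternative decomposition).

-- ===== PORT A =====
-- A's loop body: for a reserve i, remove i-1 from the lost set, else i+1, else nothing.
def stepA (S : PySem.Set Int) (i : Int) : PySem.Set Int :=
  if PySem.Set.contains S (i - 1) then (PySem.Set.remove? S (i - 1)).getD S
  else if PySem.Set.contains S (i + 1) then (PySem.Set.remove? S (i + 1)).getD S
  else S

def solution (n : Int) (lost : List Int) (reserve : List Int) : Int :=
  let losts : PySem.Set Int := PySem.Set.diff (PySem.Set.ofList lost) (PySem.Set.ofList reserve)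
  let reserves : PySem.Set Int := PySem.Set.diff (PySem.Set.ofList reserve) (PySem.Set.ofList lost)
  let final := (PySem.List.sorted reserves (fun x => x) false).foldl stepA losts
  n - PySem.Set.len final

-- ===== PORT B =====
-- the while loop of Source B: recursion on the suffixes losts[i:], reserves[j:]; result = matched
def tpB : List Int → List Int → Int
  | [], _ => 0
  | _ :: _, [] => 0
  | a :: L, b :: R =>
      if a < b - 1 then tpB L (b :: R)
      else if a > b + 1 then tpB (a :: L) R
      else 1 + tpB L R
termination_by L R => L.length + R.length
decreasing_by all_goals (simp only [List.length_cons]; omega)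

def solution_alt (n : Int) (lost : List Int) (reserve : List Int) : Int :=
  let losts := PySem.List.sorted (PySem.Set.diff (PySem.Set.ofList lost) (PySem.Set.ofList reserve)) (fun x => x) false
  let reserves := PySem.List.sorted (PySem.Set.diff (PySem.Set.ofList reserve) (PySem.Set.ofList lost)) (fun x => x) false
  let matched := tpB losts reserves
  n - ((losts.length : Int) - matched)

-- ===== PRECONDITION & SPEC =====
def Spec_solution (n : Int) (lost : List Int) (reserve : List Int) (out : Int) : Prop := out = solution_alt n lost reserve
instance (n : Int) (lost : List Int) (reserve : List Int) (out : Int) : Decidable (Spec_solution n lost reserve out) := by unfold Spec_solution; infer_instance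

-- ===== CLAIM (what is proved, stated in full; the proofs are below) =====
def Claim_equal_solution : Prop := ∀ (n : Int) (lost : List Int) (reserve : List Int), Dom_solution n lost reserve → Spec_solution n lost reserve (solution n lost reserve)

-- ===== LEMMAS AND PROOFS =====

-- tpB equations
lemma tpB_nil (R : List Int) : tpB [] R = 0 := by rw [tpB.eq_def]
lemma tpB_nilR (a : Int) (L : List Int) : tpB (a :: L) [] = 0 := by rw [tpB.eq_def]
lemma tpB_cons (a : Int) (L : List Int) (b : Int) (R : List Int) :
    tpB (a :: L) (b :: R) =
      if a < b - 1 then tpB L (b :: R)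
      else if a > b + 1 then tpB (a :: L) R
      else 1 + tpB L R := by rw [tpB.eq_def]

-- A's loop body, with plain membership and filter
lemma stepA_eq (S : List Int) (i : Int) :
    stepA S i = if (i - 1) ∈ S then S.filter (fun y => !(y == (i - 1)))
                else if (i + 1) ∈ S then S.filter (fun y => !(y == (i + 1)))
                else S := by
  unfold stepA PySem.Set.remove? PySem.Set.contains PySem.Set.discard
  simp only [List.contains_iff_mem]
  split_ifs <;> simp_all

-- stepA respects permutation of the lost set
lemma stepA_perm {S T : List Int} (h : S.Perm T) (i : Int) : (stepA S i).Perm (stepA T i) := by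
  rw [stepA_eq, stepA_eq]
  by_cases h1 : (i - 1) ∈ S
  · rw [if_pos h1, if_pos (h.mem_iff.mp h1)]; exact h.filter _
  · rw [if_neg h1, if_neg (fun hm => h1 (h.mem_iff.mpr hm))]
    by_cases h2 : (i + 1) ∈ S
    · rw [if_pos h2, if_pos (h.mem_iff.mp h2)]; exact h.filter _
    · rw [if_neg h2, if_neg (fun hm => h2 (h.mem_iff.mpr hm))]; exact h

lemma foldl_stepA_perm (R : List Int) {S T : List Int} (h : S.Perm T) :
    (R.foldl stepA S).Perm (R.foldl stepA T) := by
  induction R generalizing S T with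
  | nil => simpa using h
  | cons r R ih => exact ih (stepA_perm h r)

lemma foldl_stepA_nil (R : List Int) : R.foldl stepA [] = [] := by
  induction R with
  | nil => rfl
  | cons r R ih => rw [List.foldl_cons, show stepA [] r = [] by rw [stepA_eq]; simp, ih]

-- a lost element smaller than every reserve - 1 is never touched by A's loop
lemma foldl_stepA_small_head {a : Int} (R : List Int) (h : ∀ r ∈ R, a < r - 1) (S : List Int) :
    R.foldl stepA (a :: S) = a :: R.foldl stepA S := by
  induction R generalizing S with
  | nil => rfl
  | cons r R ih =>
      have ha : a < r - 1 := h r (by simp)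
      have hne1 : a ≠ r - 1 := by omega
      have hne2 : a ≠ r + 1 := by omega
      have hstep : stepA (a :: S) r = a :: stepA S r := by
        rw [stepA_eq, stepA_eq]
        by_cases h1 : (r - 1) ∈ S
        · rw [if_pos (by simp [h1]), if_pos h1, List.filter_cons, if_pos (by simp [hne1])]
        · have h1' : (r - 1) ∉ a :: S := by
            intro hm; rcases List.mem_cons.mp hm with hm | hm
            · exact hne1 hm.symm
            · exact h1 hm
          rw [if_neg h1', if_neg h1]
          by_cases h2 : (r + 1) ∈ S
          · rw [if_pos (by simp [h2]), if_pos h2, List.filter_cons, if_pos (by simp [hne2])]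
          · have h2' : (r + 1) ∉ a :: S := by
              intro hm; rcases List.mem_cons.mp hm with hm | hm
              · exact hne2 hm.symm
              · exact h2 hm
            rw [if_neg h2', if_neg h2]
      simp only [List.foldl_cons, hstep]
      exact ih (fun r' hr' => h r' (by simp [hr'])) _

lemma filter_ne_eq_self {x : Int} {S : List Int} (h : ∀ y ∈ S, y ≠ x) :
    S.filter (fun y => !(y == x)) = S :=
  List.filter_eq_self.mpr (fun y hy => by simpa using h y hy)

-- main invariant: on strictly sorted disjoint lists, the size of A's final lost set
-- is the initial size minus B's two-pointer match count
lemma main_eq : ∀ (N : Nat) (S R : List Int), S.length + R.length ≤ N →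
    S.Pairwise (· < ·) → R.Pairwise (· < ·) → (∀ x ∈ S, x ∉ R) →
    ((R.foldl stepA S).length : Int) = (S.length : Int) - tpB S R := by
  intro N
  induction N with
  | zero =>
      intro S R hN _ _ _
      have hS : S = [] := by cases S <;> simp_all
      have hR : R = [] := by cases R <;> simp_all
      subst hS; subst hR; simp [tpB_nil]
  | succ N ih =>
      intro S R hN hS hR hd
      match S, R with
      | [], R => simp [foldl_stepA_nil, tpB_nil]
      | a :: S', [] => simp [tpB_nilR]
      | a :: S', r :: R' =>
          have hS' : S'.Pairwise (· < ·) := hS.sublist (by simp)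
          have hR' : R'.Pairwise (· < ·) := hR.sublist (by simp)
          have haS' : ∀ y ∈ S', a < y := fun y hy => (List.pairwise_cons.mp hS).1 y hy
          have hrR' : ∀ y ∈ R', r < y := fun y hy => (List.pairwise_cons.mp hR).1 y hy
          have hane : a ≠ r := fun h => hd a (by simp) (by simp [h])
          have hNle : S'.length + (r :: R').length ≤ N := by simp at hN ⊢; omega
          rcases lt_trichotomy a (r - 1) with h1 | h1 | h1
          · -- a < r - 1 : a is matched by neither program; drop it
            have hall : ∀ r' ∈ r :: R', a < r' - 1 := by
              intro r' hr'; rcases List.mem_cons.mp hr' with h | h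
              · omega
              · have := hrR' r' h; omega
            have hrec := ih S' (r :: R') hNle hS' hR (fun x hx => hd x (by simp [hx]))
            rw [foldl_stepA_small_head _ hall, tpB_cons, if_pos h1]
            simp only [List.length_cons]
            push_cast
            omega
          · -- a = r - 1 : matched by A's left rule, and by B (|a - r| ≤ 1)
            have hstep : stepA (a :: S') r = S' := by
              rw [stepA_eq]
              rw [if_pos (show (r - 1) ∈ a :: S' by simp [← h1])]
              rw [List.filter_cons, if_neg (by simp [← h1])]
              exact filter_ne_eq_self (fun y hy => by have := haS' y hy; omega)
            have hrec := ih S' R' (by simp at hN ⊢; omega) hS' hR'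
              (fun x hx hm => hd x (by simp [hx]) (by simp [hm]))
            rw [tpB_cons, if_neg (by omega), if_neg (by omega)]
            simp only [List.foldl_cons, hstep, List.length_cons]
            push_cast
            omega
          · rcases lt_trichotomy a (r + 1) with h2 | h2 | h2
            · omega  -- r - 1 < a < r + 1 forces a = r, impossible by disjointness
            · -- a = r + 1 : matched by A's right rule, and by B
              have hstep : stepA (a :: S') r = S' := by
                rw [stepA_eq]
                have hno : (r - 1) ∉ a :: S' := by
                  intro hm; rcases List.mem_cons.mp hm with hm | hm
                  · omega
                  · have := haS' _ hm; omega
                rw [if_neg hno, if_pos (show (r + 1) ∈ a :: S' by simp [← h2])]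
                rw [List.filter_cons, if_neg (by simp [← h2])]
                exact filter_ne_eq_self (fun y hy => by have := haS' y hy; omega)
              have hrec := ih S' R' (by simp at hN ⊢; omega) hS' hR'
                (fun x hx hm => hd x (by simp [hx]) (by simp [hm]))
              rw [tpB_cons, if_neg (by omega), if_neg (by omega)]
              simp only [List.foldl_cons, hstep, List.length_cons]
              push_cast
              omega
            · -- a > r + 1 : reserve r matches nothing
              have hstep : stepA (a :: S') r = a :: S' := by
                rw [stepA_eq]
                have hno1 : (r - 1) ∉ a :: S' := by
                  intro hm; rcases List.mem_cons.mp hm with hm | hm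
                  · omega
                  · have := haS' _ hm; omega
                have hno2 : (r + 1) ∉ a :: S' := by
                  intro hm; rcases List.mem_cons.mp hm with hm | hm
                  · omega
                  · have := haS' _ hm; omega
                rw [if_neg hno1, if_neg hno2]
              have hrec := ih (a :: S') R' (by simp at hN ⊢; omega) hS hR'
                (fun x hx hm => hd x hx (by simp [hm]))
              rw [tpB_cons, if_neg (by omega), if_pos (by omega)]
              simp only [List.foldl_cons, hstep]
              omega

-- ===== VERDICT (by name: the statement is the Claim_ definition above) =====
theorem solution_spec : Claim_equal_solution := by
  intro n lost reserve _
  unfold Spec_solution solution solution_alt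
  dsimp only
  set losts0 : PySem.Set Int := PySem.Set.diff (PySem.Set.ofList lost) (PySem.Set.ofList reserve) with hlosts0
  set reserves0 : PySem.Set Int := PySem.Set.diff (PySem.Set.ofList reserve) (PySem.Set.ofList lost) with hreserves0
  set L := PySem.List.sorted losts0 (fun x => x) false with hL
  set R := PySem.List.sorted reserves0 (fun x => x) false with hR
  have hpermL : L.Perm losts0 := PySem.List.sorted_perm _ _ _
  have hLnd : L.Nodup := hpermL.nodup_iff.mpr
    (PySem.Set.nodup_diff _ _ (PySem.Set.nodup_ofList lost))
  have hRnd : R.Nodup := (PySem.List.sorted_perm _ _ _).nodup_iff.mpr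
    (PySem.Set.nodup_diff _ _ (PySem.Set.nodup_ofList reserve))
  have hLsort : L.Pairwise (· < ·) :=
    ((PySem.List.sorted_pairwise _ _).and hLnd).imp (fun h => lt_of_le_of_ne h.1 h.2)
  have hRsort : R.Pairwise (· < ·) :=
    ((PySem.List.sorted_pairwise _ _).and hRnd).imp (fun h => lt_of_le_of_ne h.1 h.2)
  have hdisj : ∀ x ∈ L, x ∉ R := by
    intro x hxL hxR
    have hxl : x ∈ losts0 := (PySem.List.mem_sorted _ _ _ _).mp hxL
    have hxr : x ∈ reserves0 := (PySem.List.mem_sorted _ _ _ _).mp hxR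
    rw [hlosts0] at hxl; rw [hreserves0] at hxr
    have hxl' := (PySem.Set.mem_diff _ _ _).mp hxl
    have hxr' := (PySem.Set.mem_diff _ _ _).mp hxr
    exact hxl'.2 ((PySem.Set.mem_ofList _ _).mpr ((PySem.Set.mem_ofList _ _).mp hxr'.1))
  have hmain := main_eq (L.length + R.length) L R le_rfl hLsort hRsort hdisj
  have hlen : (R.foldl stepA losts0).length = (R.foldl stepA L).length :=
    (foldl_stepA_perm R hpermL.symm).length_eq
  unfold PySem.Set.len
  rw [hlen, hmain]
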